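-- pv_equiv track=rewrite | github.com/cabgen0138/insurance_app | utils/premium_utils.py | get_missing_premiums_text
-- ===== SOURCE A (Python) =====
-- def get_missing_premiums_text(received_additional_docs: dict) -> str:
--     """
--     Generate text for missing premiums based on which ones were received
--     """
--     target_received = any("Target Premium" in doc and received for doc, received in received_additional_docs.items())
--     renewal_received = any("Renewal Premium" in doc and received for doc, received in received_additional_docs.items())
--     expiring_received = any("Expiring Premium" in doc and received for doc, received in received_additional_docs.items())
--
--     missing_premiums = []
--     if not target_received:
--         missing_premiums.append("Target")
--     if not renewal_received:
--         missing_premiums.append("Renewal")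
--     if not expiring_received:
--         missing_premiums.append("Expiring")
--
--     if not missing_premiums:
--         return None  # All premiums received
--
--     if len(missing_premiums) == 1:
--         return f"• {missing_premiums[0]} Premium"
--     elif len(missing_premiums) == 2:
--         return f"• {missing_premiums[0]} and {missing_premiums[1]} Premiums"
--     else:
--         return f"• Target, Renewal and Expiring Premiums"
-- ===== SOURCE B (Python) =====
-- def get_missing_premiums_text(received_additional_docs: dict) -> str:
--     """
--     Generate text for missing premiums based on which ones were received
--     """
--     names = ("Target", "Renewal", "Expiring")
--     got = set()
--     for doc, received in received_additional_docs.items():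
--         if received:
--             for name in names:
--                 if f"{name} Premium" in doc:
--                     got.add(name)
--     missing = [name for name in names if name not in got]
--     if not missing:
--         return None
--     if len(missing) == 1:
--         return f"• {missing[0]} Premium"
--     return "• " + ", ".join(missing[:-1]) + " and " + missing[-1] + " Premiums"
-- ===== Notes on version B (the rewrite author's own statement) =====
-- stated objective: simpler
-- what changed: One pass over the items collecting a set of received premium names (instead of three separate any-scans), then a generic comma/and join instead of a length-indexed chain of format strings.
import Mathlib
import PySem

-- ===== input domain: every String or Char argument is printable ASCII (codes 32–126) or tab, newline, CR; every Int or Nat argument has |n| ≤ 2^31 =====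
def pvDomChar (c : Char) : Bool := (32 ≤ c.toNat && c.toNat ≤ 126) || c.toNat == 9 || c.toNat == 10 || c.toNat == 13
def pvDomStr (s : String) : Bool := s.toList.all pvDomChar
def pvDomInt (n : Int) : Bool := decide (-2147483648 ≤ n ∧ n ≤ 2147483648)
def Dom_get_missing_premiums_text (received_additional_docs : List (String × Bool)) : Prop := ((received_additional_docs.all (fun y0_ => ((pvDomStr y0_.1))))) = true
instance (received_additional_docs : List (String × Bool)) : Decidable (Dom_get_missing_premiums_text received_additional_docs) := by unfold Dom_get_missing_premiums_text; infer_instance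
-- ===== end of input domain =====

-- ===== PORT A =====
-- B differs from A by a single-pass set-collection over the items and a generic join; objective: simpler.
def get_missing_premiums_text (received_additional_docs : List (String × Bool)) : Option String :=
  let items := (PySem.Dict.ofList received_additional_docs).items
  let target_received := items.any (fun p => PySem.Str.isIn "Target Premium" p.1 && p.2)
  let renewal_received := items.any (fun p => PySem.Str.isIn "Renewal Premium" p.1 && p.2)
  let expiring_received := items.any (fun p => PySem.Str.isIn "Expiring Premium" p.1 && p.2)
  let missing_premiums : List String :=
    ((if !target_received then ["Target"] else []) ++
     (if !renewal_received then ["Renewal"] else [])) ++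
    (if !expiring_received then ["Expiring"] else [])
  if missing_premiums = [] then none
  else if missing_premiums.length = 1 then
    some ("• " ++ missing_premiums[0]! ++ " Premium")
  else if missing_premiums.length = 2 then
    some ("• " ++ missing_premiums[0]! ++ " and " ++ missing_premiums[1]! ++ " Premiums")
  else some "• Target, Renewal and Expiring Premiums"

-- ===== PORT B =====
def pvNames : List String := ["Target", "Renewal", "Expiring"]

def get_missing_premiums_text_alt (received_additional_docs : List (String × Bool)) : Option String :=
  let items := (PySem.Dict.ofList received_additional_docs).items
  let got : PySem.Set String := items.foldl
    (fun s p =>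
      if p.2 then
        pvNames.foldl (fun s n => if PySem.Str.isIn (n ++ " Premium") p.1 then s.add n else s) s
      else s)
    PySem.Set.empty
  let missing := pvNames.filter (fun n => !(PySem.Set.contains got n))
  match missing with
  | [] => none
  | [x] => some ("• " ++ x ++ " Premium")
  | _ => some ("• " ++ PySem.Str.join ", " missing.dropLast ++ " and " ++ missing.getLast! ++ " Premiums")

-- ===== PRECONDITION & SPEC =====
def Spec_get_missing_premiums_text (received_additional_docs : List (String × Bool)) (out : Option String) : Prop := out = get_missing_premiums_text_alt received_additional_docs
instance (received_additional_docs : List (String × Bool)) (out : Option String) : Decidable (Spec_get_missing_premiums_text received_additional_docs out) := by unfold Spec_get_missing_premiums_text; infer_instance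

-- ===== CLAIM (what is proved, stated in full; the proofs are below) =====
def Claim_equal_get_missing_premiums_text : Prop := ∀ (received_additional_docs : List (String × Bool)), Dom_get_missing_premiums_text received_additional_docs → Spec_get_missing_premiums_text received_additional_docs (get_missing_premiums_text received_additional_docs)

-- ===== LEMMAS AND PROOFS =====
def pvInner (doc : String) (s : PySem.Set String) : PySem.Set String :=
  pvNames.foldl (fun s n => if PySem.Str.isIn (n ++ " Premium") doc then s.add n else s) s

def pvOuter (l : List (String × Bool)) (s : PySem.Set String) : PySem.Set String :=
  l.foldl (fun s p => if p.2 then pvInner p.1 s else s) s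

lemma pvInner_mem (doc : String) (s : PySem.Set String) (n : String) :
    n ∈ pvInner doc s ↔ n ∈ s ∨ (n ∈ pvNames ∧ PySem.Str.isIn (n ++ " Premium") doc = true) := by
  simp only [pvInner, pvNames, List.foldl_cons, List.foldl_nil, List.mem_cons,
    List.not_mem_nil, or_false]
  split_ifs with h1 h2 h3 <;>
    (try simp only [PySem.Set.mem_add]) <;> constructor <;> intro h <;> aesop

lemma pvOuter_mem (l : List (String × Bool)) (s : PySem.Set String) (n : String) :
    n ∈ pvOuter l s ↔
      n ∈ s ∨ (n ∈ pvNames ∧ l.any (fun p => PySem.Str.isIn (n ++ " Premium") p.1 && p.2) = true) := by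
  induction l generalizing s with
  | nil => simp [pvOuter]
  | cons p t ih =>
    simp only [pvOuter, List.foldl_cons, List.any_cons] at *
    by_cases hp : p.2
    · rw [if_pos hp, ih, pvInner_mem]
      simp [hp]
      tauto
    · rw [if_neg hp, ih]
      simp [hp]

lemma pv_contains (l : List (String × Bool)) (n : String) (hn : n ∈ pvNames) :
    PySem.Set.contains (pvOuter l PySem.Set.empty) n =
      l.any (fun p => PySem.Str.isIn (n ++ " Premium") p.1 && p.2) := by
  rw [Bool.eq_iff_iff, PySem.Set.contains_iff, pvOuter_mem]
  simp [PySem.Set.empty, hn]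

lemma pv_main (l : List (String × Bool)) :
    (if (((if !(l.any (fun p => PySem.Str.isIn "Target Premium" p.1 && p.2)) then ["Target"] else []) ++
          (if !(l.any (fun p => PySem.Str.isIn "Renewal Premium" p.1 && p.2)) then ["Renewal"] else [])) ++
         (if !(l.any (fun p => PySem.Str.isIn "Expiring Premium" p.1 && p.2)) then ["Expiring"] else []) : List String) = []
     then (none : Option String)
     else if ((((if !(l.any (fun p => PySem.Str.isIn "Target Premium" p.1 && p.2)) then ["Target"] else []) ++
          (if !(l.any (fun p => PySem.Str.isIn "Renewal Premium" p.1 && p.2)) then ["Renewal"] else [])) ++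
         (if !(l.any (fun p => PySem.Str.isIn "Expiring Premium" p.1 && p.2)) then ["Expiring"] else []) : List String)).length = 1
     then some ("• " ++ ((((if !(l.any (fun p => PySem.Str.isIn "Target Premium" p.1 && p.2)) then ["Target"] else []) ++
          (if !(l.any (fun p => PySem.Str.isIn "Renewal Premium" p.1 && p.2)) then ["Renewal"] else [])) ++
         (if !(l.any (fun p => PySem.Str.isIn "Expiring Premium" p.1 && p.2)) then ["Expiring"] else []) : List String))[0]! ++ " Premium")
     else if ((((if !(l.any (fun p => PySem.Str.isIn "Target Premium" p.1 && p.2)) then ["Target"] else []) ++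
          (if !(l.any (fun p => PySem.Str.isIn "Renewal Premium" p.1 && p.2)) then ["Renewal"] else [])) ++
         (if !(l.any (fun p => PySem.Str.isIn "Expiring Premium" p.1 && p.2)) then ["Expiring"] else []) : List String)).length = 2
     then some ("• " ++ ((((if !(l.any (fun p => PySem.Str.isIn "Target Premium" p.1 && p.2)) then ["Target"] else []) ++
          (if !(l.any (fun p => PySem.Str.isIn "Renewal Premium" p.1 && p.2)) then ["Renewal"] else [])) ++
         (if !(l.any (fun p => PySem.Str.isIn "Expiring Premium" p.1 && p.2)) then ["Expiring"] else []) : List String))[0]! ++ " and " ++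
       ((((if !(l.any (fun p => PySem.Str.isIn "Target Premium" p.1 && p.2)) then ["Target"] else []) ++
          (if !(l.any (fun p => PySem.Str.isIn "Renewal Premium" p.1 && p.2)) then ["Renewal"] else [])) ++
         (if !(l.any (fun p => PySem.Str.isIn "Expiring Premium" p.1 && p.2)) then ["Expiring"] else []) : List String))[1]! ++ " Premiums")
     else some "• Target, Renewal and Expiring Premiums") =
    (match pvNames.filter (fun n => !(PySem.Set.contains (pvOuter l PySem.Set.empty) n)) with
     | [] => none
     | [x] => some ("• " ++ x ++ " Premium")
     | _ => some ("• " ++ PySem.Str.join ", "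
         (pvNames.filter (fun n => !(PySem.Set.contains (pvOuter l PySem.Set.empty) n))).dropLast ++ " and " ++
         (pvNames.filter (fun n => !(PySem.Set.contains (pvOuter l PySem.Set.empty) n))).getLast! ++ " Premiums")) := by
  have hT := pv_contains l "Target" (by simp [pvNames])
  have hR := pv_contains l "Renewal" (by simp [pvNames])
  have hE := pv_contains l "Expiring" (by simp [pvNames])
  have hTs : ("Target" : String) ++ " Premium" = "Target Premium" := by decide
  have hRs : ("Renewal" : String) ++ " Premium" = "Renewal Premium" := by decide
  have hEs : ("Expiring" : String) ++ " Premium" = "Expiring Premium" := by decide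
  rw [hTs] at hT; rw [hRs] at hR; rw [hEs] at hE
  simp only [pvNames, List.filter_cons, List.filter_nil, hT, hR, hE]
  rcases ht : l.any (fun p => PySem.Str.isIn "Target Premium" p.1 && p.2) with _ | _ <;>
  rcases hr : l.any (fun p => PySem.Str.isIn "Renewal Premium" p.1 && p.2) with _ | _ <;>
  rcases he : l.any (fun p => PySem.Str.isIn "Expiring Premium" p.1 && p.2) with _ | _ <;>
    rfl

-- ===== VERDICT (by name: the statement is the Claim_ definition above) =====
theorem get_missing_premiums_text_spec : Claim_equal_get_missing_premiums_text := by
  intro xs _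
  show get_missing_premiums_text xs = get_missing_premiums_text_alt xs
  exact pv_main ((PySem.Dict.ofList xs).items)
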